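-- pv_equiv track=rewrite | github.com/25bai71128/MODEL_PREDICTION | src/meta_recommender/predictor.py | _iter_group_slices
-- ===== SOURCE A (Python) =====
-- def _iter_group_slices(groups: list[int]) -> list[tuple[int, int]]:
--     slices: list[tuple[int, int]] = []
--     start = 0
--     for size in groups:
--         end = start + size
--         slices.append((start, end))
--         start = end
--     return slices
-- ===== SOURCE B (Python) =====
-- def _iter_group_slices(groups: list[int]) -> list[tuple[int, int]]:
--     # Divide and conquer: slice the two halves independently, then shift the
--     # right half's slices by the left half's total.
--     if len(groups) <= 1:
--         return [(0, groups[0])] if groups else []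
--     mid = len(groups) // 2
--     left, right = groups[:mid], groups[mid:]
--     off = sum(left)
--     return _iter_group_slices(left) + [(s + off, e + off) for s, e in _iter_group_slices(right)]
-- ===== Notes on version B (the rewrite author's own statement) =====
-- stated objective: alternative
-- what changed: B replaces A's single pass threading a running start with a divide-and-conquer recursion: it slices the two halves of the list independently and shifts the right half's slices by the left half's total, relying on translation-invariance of the slice layout.
import Mathlib
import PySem

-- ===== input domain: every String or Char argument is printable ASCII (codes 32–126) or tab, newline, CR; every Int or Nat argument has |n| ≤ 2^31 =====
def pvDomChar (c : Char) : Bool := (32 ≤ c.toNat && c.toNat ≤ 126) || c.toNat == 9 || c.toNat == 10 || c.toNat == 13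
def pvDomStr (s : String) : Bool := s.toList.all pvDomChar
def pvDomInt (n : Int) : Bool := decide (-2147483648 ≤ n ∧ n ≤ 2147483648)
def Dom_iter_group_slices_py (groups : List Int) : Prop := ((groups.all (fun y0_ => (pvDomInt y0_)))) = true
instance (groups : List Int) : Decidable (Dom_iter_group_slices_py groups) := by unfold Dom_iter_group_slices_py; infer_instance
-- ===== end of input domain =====

-- B replaces A's running-start loop with a divide-and-conquer recursion: slice each
-- half independently and shift the right half's slices by the left half's total.

-- ===== PORT A =====
-- literal port: loop over groups carrying (slices, start); append (start, start+size), start := end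
def iter_group_slices_py (groups : List Int) : List (Int × Int) :=
  (groups.foldl
    (fun (st : List (Int × Int) × Int) size =>
      let e := st.2 + size
      (st.1 ++ [(st.2, e)], e))
    ([], 0)).1

-- ===== PORT B =====
-- if len(groups) <= 1: return [(0, groups[0])] if groups else []
-- else split at mid = len//2 (groups[:mid] = take mid, groups[mid:] = drop mid),
-- recurse on both halves, shift the right half's slices by off = sum(left)
def iter_group_slices_py_alt (groups : List Int) : List (Int × Int) :=
  if _h : groups.length ≤ 1 then
    match groups with
    | [] => []
    | g :: _ => [(0, g)]
  else
    let mid := groups.length / 2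
    let left := groups.take mid
    let right := groups.drop mid
    let off := left.sum
    iter_group_slices_py_alt left ++
      (iter_group_slices_py_alt right).map (fun p => (p.1 + off, p.2 + off))
termination_by groups.length
decreasing_by
  · simp only [List.length_take]; omega
  · simp only [List.length_drop]; omega

-- ===== PRECONDITION & SPEC =====
def Spec_iter_group_slices_py (groups : List Int) (out : List (Int × Int)) : Prop := out = iter_group_slices_py_alt groups
instance (groups : List Int) (out : List (Int × Int)) : Decidable (Spec_iter_group_slices_py groups out) := by unfold Spec_iter_group_slices_py; infer_instance

-- ===== CLAIM =====
def Claim_equal_iter_group_slices_py : Prop := ∀ (groups : List Int), Dom_iter_group_slices_py groups → Spec_iter_group_slices_py groups (iter_group_slices_py groups)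

-- ===== LEMMAS AND PROOFS =====

-- reference shape: slices starting at 0, one group at a time
def slicesFrom : List Int → List (Int × Int)
  | [] => []
  | g :: gs => (0, g) :: (slicesFrom gs).map (fun p => (p.1 + g, p.2 + g))

theorem slicesFrom_append (l r : List Int) :
    slicesFrom (l ++ r)
      = slicesFrom l ++ (slicesFrom r).map (fun p => (p.1 + l.sum, p.2 + l.sum)) := by
  induction l with
  | nil => simp [slicesFrom]
  | cons g l ih =>
      simp only [List.cons_append, slicesFrom, List.sum_cons, ih, List.map_append,
        List.map_map, List.cons.injEq, true_and]
      congr 1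
      apply List.map_congr_left
      intro p _; simp [Function.comp]; constructor <;> ring

theorem alt_eq_slicesFrom : ∀ (n : ℕ) (groups : List Int), groups.length ≤ n →
    iter_group_slices_py_alt groups = slicesFrom groups := by
  intro n
  induction n with
  | zero =>
      intro groups h
      have : groups = [] := List.eq_nil_of_length_eq_zero (Nat.le_zero.mp h)
      subst this
      simp [iter_group_slices_py_alt, slicesFrom]
  | succ n ih =>
      intro groups h
      rw [iter_group_slices_py_alt]
      by_cases h1 : groups.length ≤ 1
      · simp only [h1, dite_true]
        match groups with
        | [] => simp [slicesFrom]
        | [g] => simp [slicesFrom]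
      · simp only [h1, dite_false]
        have hlen : 2 ≤ groups.length := by omega
        have hl : (groups.take (groups.length / 2)).length ≤ n := by
          simp only [List.length_take]; omega
        have hr : (groups.drop (groups.length / 2)).length ≤ n := by
          simp only [List.length_drop]; omega
        rw [ih _ hl, ih _ hr, ← slicesFrom_append, List.take_append_drop]

theorem fold_eq_slicesFrom (groups : List Int) :
    ∀ (acc : List (Int × Int)) (s : Int),
      (groups.foldl
        (fun (st : List (Int × Int) × Int) size =>
          let e := st.2 + size
          (st.1 ++ [(st.2, e)], e))
        (acc, s)).1
      = acc ++ (slicesFrom groups).map (fun p => (p.1 + s, p.2 + s)) := by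
  induction groups with
  | nil => intro acc s; simp [slicesFrom]
  | cons g gs ih =>
      intro acc s
      simp only [List.foldl, slicesFrom]
      rw [ih]
      simp only [List.map_cons, List.map_map, List.append_assoc, List.singleton_append]
      congr 2
      · simp [add_comm]
      · apply List.map_congr_left
        intro p _; simp [Function.comp]; constructor <;> ring

-- ===== VERDICT =====
theorem iter_group_slices_py_spec : Claim_equal_iter_group_slices_py := by
  intro groups _
  show iter_group_slices_py groups = iter_group_slices_py_alt groups
  unfold iter_group_slices_py
  rw [alt_eq_slicesFrom groups.length groups le_rfl]
  simpa using fold_eq_slicesFrom groups [] 0
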